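-- pv_equiv track=rewrite | github.com/quan118/aoc2020 | day17_conway_cubes.py | get_full_state
-- ===== SOURCE A (Python) =====
-- def get_full_state(cycles, initial_state):
--   new_state = []
--   width = len(initial_state[0]) + cycles*2
--   height = len(initial_state) + cycles*2
--   for z in range(-cycles, cycles+1):
--     plane = [['.' for x in range(width)] for y in range(height)]
--     new_state.append(plane)
--   for h in range(len(initial_state)):
--     for w in range(len(initial_state[0])):
--       new_state[cycles][h+cycles][w+cycles] = initial_state[h][w]
--
--   return new_state
-- ===== SOURCE B (Python) =====
-- def get_full_state(cycles, initial_state):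
--     w0 = len(initial_state[0])
--     width = w0 + 2 * cycles
--     height = len(initial_state) + 2 * cycles
--
--     def dots(n):
--         return ['.'] * n
--
--     center = ([dots(width) for _ in range(cycles)]
--               + [dots(cycles) + list(row[:w0]) + dots(cycles) for row in initial_state]
--               + [dots(width) for _ in range(cycles)])
--     return [center if z == 0 else [dots(width) for _ in range(height)]
--             for z in range(-cycles, cycles + 1)]
-- ===== Notes on version B (the rewrite author's own statement) =====
-- stated objective: simpler
-- what changed: B builds the grid in one construction pass (padded center plane assembled directly from the rows, fresh all-dot planes elsewhere) instead of allocating an all-dot 3D grid and then patching the center plane cell by cell with a triple-nested index loop.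
import Mathlib
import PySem

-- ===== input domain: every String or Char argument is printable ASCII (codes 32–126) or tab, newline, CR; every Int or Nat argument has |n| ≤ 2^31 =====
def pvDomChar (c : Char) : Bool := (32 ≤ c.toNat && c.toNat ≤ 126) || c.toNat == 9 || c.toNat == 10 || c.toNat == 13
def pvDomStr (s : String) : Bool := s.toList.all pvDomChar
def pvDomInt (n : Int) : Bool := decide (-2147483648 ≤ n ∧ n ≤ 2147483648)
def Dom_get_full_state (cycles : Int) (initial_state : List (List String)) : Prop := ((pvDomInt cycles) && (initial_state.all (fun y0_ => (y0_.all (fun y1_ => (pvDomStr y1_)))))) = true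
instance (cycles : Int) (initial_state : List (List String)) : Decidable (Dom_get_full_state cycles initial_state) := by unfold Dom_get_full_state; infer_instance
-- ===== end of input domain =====

-- B builds the grid in one construction pass (padded center plane assembled directly,
-- fresh all-dot planes elsewhere) instead of fill-then-patch; objective: simpler.

-- ===== PORT A =====
-- literal transliteration of A: build (2*cycles+1) all-dot planes, then patch the
-- center plane cell by cell with a nested index loop (in-place mutation becomes
-- functional pySetD updates of the same cells in the same order).
def get_full_state (cycles : Int) (initial_state : List (List String)) : List (List (List String)) :=
  let width : Int := ((initial_state.headD []).length : Int) + cycles * 2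
  let height : Int := ((initial_state.length : Int)) + cycles * 2
  let new_state : List (List (List String)) :=
    (PySem.List.pyRange (-cycles) (cycles + 1) 1).foldl
      (fun ns _z =>
        ns ++ [(PySem.List.pyRange 0 height 1).map
                 (fun _y => (PySem.List.pyRange 0 width 1).map (fun _x => "."))]) []
  (PySem.List.pyRange 0 ((initial_state.length : Int)) 1).foldl
    (fun ns h =>
      (PySem.List.pyRange 0 (((initial_state.headD []).length : Int)) 1).foldl
        (fun ns w =>
          let plane := PySem.List.pyGetD ns cycles []
          let row := PySem.List.pyGetD plane (h + cycles) []
          let v := PySem.List.pyGetD (PySem.List.pyGetD initial_state h []) w "."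
          PySem.List.pySetD ns cycles
            (PySem.List.pySetD plane (h + cycles)
              (PySem.List.pySetD row (w + cycles) v)))
        ns)
    new_state

-- ===== PORT B =====
-- literal transliteration of Source B
def get_full_state_alt (cycles : Int) (initial_state : List (List String)) : List (List (List String)) :=
  let w0 : Nat := (initial_state.headD []).length
  let width : Int := (w0 : Int) + 2 * cycles
  let height : Int := ((initial_state.length : Int)) + 2 * cycles
  let dots : Int → List String := fun n => List.replicate n.toNat "."
  let center : List (List String) :=
    (PySem.List.pyRange 0 cycles 1).map (fun _ => dots width)
    ++ initial_state.map (fun row => dots cycles ++ row.take w0 ++ dots cycles)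
    ++ (PySem.List.pyRange 0 cycles 1).map (fun _ => dots width)
  (PySem.List.pyRange (-cycles) (cycles + 1) 1).map
    (fun z => if z = 0 then center else (PySem.List.pyRange 0 height 1).map (fun _ => dots width))

-- ===== PRECONDITION & SPEC =====
-- Pre_ excludes exactly the inputs where A raises IndexError: empty initial_state
-- (len(initial_state[0])), a row shorter than row 0 (initial_state[h][w]), and a
-- negative cycles with a nonempty first row (new_state[cycles] on an empty list).
def Pre_get_full_state (cycles : Int) (initial_state : List (List String)) : Prop :=
  initial_state ≠ [] ∧
  (∀ row ∈ initial_state, (initial_state.headD []).length ≤ row.length) ∧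
  (0 ≤ cycles ∨ (initial_state.headD []) = [])
instance (cycles : Int) (initial_state : List (List String)) : Decidable (Pre_get_full_state cycles initial_state) := by unfold Pre_get_full_state; infer_instance
def pvWitness_get_full_state : Int × List (List String) := (1, [["a", "b"], [".", "#"]])

def Spec_get_full_state (cycles : Int) (initial_state : List (List String)) (out : List (List (List String))) : Prop := out = get_full_state_alt cycles initial_state
instance (cycles : Int) (initial_state : List (List String)) (out : List (List (List String))) : Decidable (Spec_get_full_state cycles initial_state out) := by unfold Spec_get_full_state; infer_instance

-- ===== CLAIM (what is proved, stated in full; the proofs are below) =====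
def Claim_equal_get_full_state : Prop := ∀ (cycles : Int) (initial_state : List (List String)), Dom_get_full_state cycles initial_state → Pre_get_full_state cycles initial_state → Spec_get_full_state cycles initial_state (get_full_state cycles initial_state)

-- ===== LEMMAS AND PROOFS =====

-- (range w0).map (r.getD . d) is r's first w0 elements when w0 <= |r|
theorem map_getD_range_take {α : Type} (r : List α) (d : α) (w0 : Nat) (h : w0 ≤ r.length) :
    (List.range w0).map (fun w => r.getD w d) = r.take w0 := by
  apply List.ext_getElem
  · simp [Nat.min_eq_left h]
  · intro i h1 h2
    have hi : i < w0 := by simpa using h1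
    have hir : i < r.length := lt_of_lt_of_le hi h
    simp [List.getD_eq_getElem?_getD, List.getElem?_eq_getElem hir]

-- mapping g over a list is mapping g ∘ getD over its index range
theorem range_map_getD {α β : Type} (xs : List α) (d : α) (g : α → β) :
    (List.range xs.length).map (fun h => g (xs.getD h d)) = xs.map g := by
  apply List.ext_getElem
  · simp
  · intro i h1 h2
    have hi : i < xs.length := by simpa using h1
    simp [List.getD_eq_getElem?_getD, List.getElem?_eq_getElem hi]

-- a fold whose every step writes at the fixed index p = |pre| only rewrites the cell x
theorem foldl_set_fixed {α β : Type} (G : β → α → α) (d : α) (p : Nat)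
    (pre : List α) (x : α) (post : List α) (hp : pre.length = p) (l : List β) :
    l.foldl (fun ns h => ns.set p (G h (ns.getD p d))) (pre ++ x :: post)
    = pre ++ (l.foldl (fun a h => G h a) x) :: post := by
  induction l generalizing x with
  | nil => simp
  | cons b t ih =>
    have hget : (pre ++ x :: post).getD p d = x := by
      rw [List.getD_eq_getElem?_getD, List.getElem?_append_right (le_of_eq hp)]
      simp [hp]
    have hset : (pre ++ x :: post).set p (G b x) = pre ++ (G b x) :: post := by
      rw [List.set_append_right _ _ (le_of_eq hp)]
      simp [hp]
    simp only [List.foldl_cons, hget, hset, ih]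

-- a double fold whose inner steps all write at the fixed index p = |pre|
theorem foldl2_set_fixed {α β γ : Type} (G : β → γ → α → α) (W : β → List γ) (d : α) (p : Nat)
    (pre : List α) (x : α) (post : List α) (hp : pre.length = p) (L : List β) :
    L.foldl (fun ns h => (W h).foldl (fun ns w => ns.set p (G h w (ns.getD p d))) ns) (pre ++ x :: post)
    = pre ++ (L.foldl (fun pl h => (W h).foldl (fun pl w => G h w pl) pl) x) :: post := by
  induction L generalizing x with
  | nil => simp
  | cons b t ih =>
    simp only [List.foldl_cons]
    rw [foldl_set_fixed (G b) d p pre x post hp (W b), ih]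

-- writing f w at position w + p for w < |mid| replaces mid by the written values
theorem foldl_set_shift {α : Type} (f : Nat → α) (p : Nat)
    (pre mid post : List α) (hp : pre.length = p) :
    (List.range mid.length).foldl (fun l w => l.set (w + p) (f w)) (pre ++ mid ++ post)
    = pre ++ (List.range mid.length).map f ++ post := by
  induction mid using List.reverseRecOn generalizing post with
  | nil => simp
  | append_singleton mid' x ih =>
    have hlen : (mid' ++ [x]).length = mid'.length + 1 := by simp
    rw [hlen, List.range_succ, List.foldl_append]
    have hassoc : pre ++ (mid' ++ [x]) ++ post = pre ++ mid' ++ (x :: post) := by simp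
    rw [hassoc, ih]
    simp only [List.foldl_cons, List.foldl_nil]
    rw [List.append_assoc, List.set_append_right _ _ (by omega)]
    have hidx : mid'.length + p - pre.length = mid'.length := by omega
    rw [hidx, List.set_append_right _ _ (by simp)]
    have hidx2 : mid'.length - ((List.range mid'.length).map f).length = 0 := by simp
    rw [hidx2, List.set_cons_zero]
    simp

-- the plane loop: step h writes (only) at index h + p, through an inner fold that may
-- read the cell it rewrites; mid is replaced pointwise
theorem foldl2_set_get_shift {α γ : Type} (G : Nat → γ → α → α) (W : Nat → List γ) (d : α) (p : Nat)
    (pre mid post : List α) (hp : pre.length = p) :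
    (List.range mid.length).foldl
      (fun l h => (W h).foldl (fun l w => l.set (h + p) (G h w (l.getD (h + p) d))) l)
      (pre ++ mid ++ post)
    = pre ++ (List.range mid.length).map (fun h => (W h).foldl (fun r w => G h w r) (mid.getD h d)) ++ post := by
  induction mid using List.reverseRecOn generalizing post with
  | nil => simp
  | append_singleton mid' x ih =>
    have hlen : (mid' ++ [x]).length = mid'.length + 1 := by simp
    rw [hlen, List.range_succ, List.foldl_append]
    have hassoc : pre ++ (mid' ++ [x]) ++ post = pre ++ mid' ++ (x :: post) := by simp
    rw [hassoc, ih]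
    simp only [List.foldl_cons, List.foldl_nil]
    have hp2 : (pre ++ (List.range mid'.length).map (fun h => (W h).foldl (fun r w => G h w r) (mid'.getD h d))).length = mid'.length + p := by
      simp [hp]; omega
    rw [foldl_set_fixed (G mid'.length) d (mid'.length + p) _ x post hp2 (W mid'.length)]
    have hmap : (List.range mid'.length).map (fun h => (W h).foldl (fun r w => G h w r) (mid'.getD h d))
        = (List.range mid'.length).map (fun h => (W h).foldl (fun r w => G h w r) ((mid' ++ [x]).getD h d)) := by
      apply List.map_congr_left
      intro h hh
      rw [List.mem_range] at hh
      rw [List.getD_eq_getElem?_getD, List.getD_eq_getElem?_getD, List.getElem?_append_left hh]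
    rw [List.map_append, ← hmap]
    simp

-- the negative-cycles case admitted by Pre_ (first row empty): both programs return []
theorem neg_case (c : Int) (xs : List (List String)) (hc : c < 0) (h0 : xs.headD [] = []) :
    get_full_state c xs = get_full_state_alt c xs := by
  have hz : PySem.List.pyRange (-c) (c + 1) 1 = [] := PySem.List.pyRange_one_eq_nil (by omega)
  have hw : PySem.List.pyRange 0 (((xs.headD []).length : Int)) 1 = [] := by
    rw [h0]; exact PySem.List.pyRange_one_eq_nil (by simp)
  unfold get_full_state get_full_state_alt
  simp only [hz, hw, List.foldl_nil, List.map_nil]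
  induction (PySem.List.pyRange 0 ((xs.length : Int)) 1) with
  | nil => simp
  | cons a t ih => simp [ih]

-- the main (0 ≤ cycles) case
theorem pos_case (k : Nat) (xs : List (List String)) (_hne : xs ≠ [])
    (hrows : ∀ row ∈ xs, (xs.headD []).length ≤ row.length) :
    get_full_state (k : Int) xs = get_full_state_alt (k : Int) xs := by
  unfold get_full_state get_full_state_alt
  set w0 : Nat := (xs.headD []).length with hw0
  set n : Nat := xs.length with hn
  set dotsRow : List String := List.replicate (w0 + 2 * k) "." with hdots
  set blank : List (List String) := List.replicate (n + 2 * k) dotsRow with hblank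
  have hwidth2 : (((w0 : Int)) + 2 * (k : Int)).toNat = w0 + 2 * k := by omega
  -- the all-dot plane, as B builds it
  have hplaneB : (PySem.List.pyRange 0 (((n : Int)) + 2 * (k : Int)) 1).map
      (fun _ => List.replicate (((w0 : Int)) + 2 * (k : Int)).toNat ".") = blank := by
    have h1 : ((n : Int)) + 2 * (k : Int) = ((n + 2 * k : Nat) : Int) := by push_cast; ring
    rw [h1, PySem.List.pyRange_zero_natCast]
    simp [hblank, hdots, hwidth2, Function.comp_def, List.map_const']
  simp only []
  trans (List.replicate k blank ++
      (List.replicate k dotsRow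
        ++ xs.map (fun r => List.replicate k "." ++ r.take w0 ++ List.replicate k ".")
        ++ List.replicate k dotsRow) :: List.replicate k blank)
  · -- A side
    rw [PySem.List.foldl_append_singleton_eq_map]
    simp only [List.nil_append, List.map_const', PySem.List.length_pyRange_one]
    have hzl : (((k : Int) + 1) - (-(k : Int))).toNat = 2 * k + 1 := by omega
    rw [hzl]
    have e1 : (((n : Int)) + (k : Int) * 2 - 0).toNat = n + 2 * k := by omega
    have e2 : (((w0 : Int)) + (k : Int) * 2 - 0).toNat = w0 + 2 * k := by omega
    rw [e1, e2, ← hdots, ← hblank]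
    have hrep : List.replicate (2 * k + 1) blank
        = List.replicate k blank ++ blank :: List.replicate k blank := by
      have h : 2 * k + 1 = k + (k + 1) := by omega
      rw [h, List.replicate_add, List.replicate_succ]
    rw [hrep]
    simp only [PySem.List.pySetD_natCast, PySem.List.pyGetD_natCast]
    rw [foldl2_set_fixed
      (fun (h w : Int) (pl : List (List String)) =>
        PySem.List.pySetD pl (h + (k : Int))
          (PySem.List.pySetD (PySem.List.pyGetD pl (h + (k : Int)) []) (w + (k : Int))
            (PySem.List.pyGetD (PySem.List.pyGetD xs h []) w ".")))
      (fun _ => PySem.List.pyRange 0 ((w0 : Int)) 1) [] k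
      (List.replicate k blank) blank (List.replicate k blank) (by simp)
      (PySem.List.pyRange 0 ((n : Int)) 1)]
    simp only [PySem.List.pyRange_zero_natCast, List.foldl_map]
    simp only [← Nat.cast_add, PySem.List.pySetD_natCast, PySem.List.pyGetD_natCast]
    congr 2
    have hmid := foldl2_set_get_shift
      (fun (h w : Nat) (r : List String) => r.set (w + k) ((xs.getD h []).getD w "."))
      (fun _ => List.range w0) ([] : List String) k
      (List.replicate k dotsRow) (List.replicate n dotsRow) (List.replicate k dotsRow) (by simp)
    simp only [List.length_replicate] at hmid
    have hsplit : blank = List.replicate k dotsRow ++ List.replicate n dotsRow ++ List.replicate k dotsRow := by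
      rw [hblank]
      have h : n + 2 * k = k + (n + k) := by omega
      rw [h, List.replicate_add, List.replicate_add, List.append_assoc]
    rw [hsplit, hmid]
    congr 1
    rw [← range_map_getD xs ([] : List String)
      (fun r => List.replicate k "." ++ r.take w0 ++ List.replicate k ".")]
    rw [← hn]
    congr 1
    apply List.map_congr_left
    intro h hh
    rw [List.mem_range] at hh
    have hgetrep : (List.replicate n dotsRow).getD h ([] : List String) = dotsRow := by
      rw [List.getD_eq_getElem?_getD, List.getElem?_replicate]
      simp [hh]
    rw [hgetrep]
    have hdsplit : dotsRow = List.replicate k "." ++ List.replicate w0 "." ++ List.replicate k "." := by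
      rw [hdots]
      have h2 : w0 + 2 * k = k + (w0 + k) := by omega
      rw [h2, List.replicate_add, List.replicate_add, List.append_assoc]
    have hshift := foldl_set_shift (fun w => (xs.getD h []).getD w ".") k
      (List.replicate k ".") (List.replicate w0 ".") (List.replicate k ".") (by simp)
    simp only [List.length_replicate] at hshift
    rw [hdsplit, hshift]
    have hrowlen : w0 ≤ (xs.getD h ([] : List String)).length := by
      have hmem : xs.getD h ([] : List String) ∈ xs := by
        rw [List.getD_eq_getElem?_getD, List.getElem?_eq_getElem (by omega : h < xs.length)]
        exact List.getElem_mem _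
      exact hrows _ hmem
    rw [map_getD_range_take _ "." w0 hrowlen]
  · -- B side
    symm
    simp only [hplaneB]
    simp only [hwidth2, ← hdots, Int.toNat_natCast]
    have hcenter : (PySem.List.pyRange 0 ((k : Int)) 1).map (fun _ => dotsRow) = List.replicate k dotsRow := by
      rw [PySem.List.pyRange_zero_natCast]
      simp [Function.comp_def, List.map_const']
    simp only [hcenter]
    rw [PySem.List.pyRange_one_append (-(k : Int)) 0 ((k : Int) + 1) (by omega) (by omega),
      PySem.List.pyRange_one_cons (by omega : (0 : Int) < (k : Int) + 1), List.map_append, List.map_cons]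
    have hneg : (PySem.List.pyRange (-(k : Int)) 0 1).map
        (fun z => if z = 0 then List.replicate k dotsRow ++
            xs.map (fun row => List.replicate k "." ++ row.take w0 ++ List.replicate k ".") ++
            List.replicate k dotsRow
          else blank) = List.replicate k blank := by
      have hcg := List.map_congr_left (l := PySem.List.pyRange (-(k : Int)) 0 1)
        (f := fun z => if z = 0 then List.replicate k dotsRow ++
            xs.map (fun row => List.replicate k "." ++ row.take w0 ++ List.replicate k ".") ++
            List.replicate k dotsRow
          else blank) (g := fun _ => blank)
        (fun z hz => by
          rw [PySem.List.mem_pyRange_one] at hz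
          exact if_neg (by omega))
      rw [hcg]
      simp [List.map_const', PySem.List.length_pyRange_one]
    have hpos : (PySem.List.pyRange 1 ((k : Int) + 1) 1).map
        (fun z => if z = 0 then List.replicate k dotsRow ++
            xs.map (fun row => List.replicate k "." ++ row.take w0 ++ List.replicate k ".") ++
            List.replicate k dotsRow
          else blank) = List.replicate k blank := by
      have hcg := List.map_congr_left (l := PySem.List.pyRange 1 ((k : Int) + 1) 1)
        (f := fun z => if z = 0 then List.replicate k dotsRow ++
            xs.map (fun row => List.replicate k "." ++ row.take w0 ++ List.replicate k ".") ++
            List.replicate k dotsRow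
          else blank) (g := fun _ => blank)
        (fun z hz => by
          rw [PySem.List.mem_pyRange_one] at hz
          exact if_neg (by omega))
      rw [hcg]
      simp [List.map_const', PySem.List.length_pyRange_one]
    simp only [zero_add]
    rw [hneg, hpos]
    simp

theorem get_full_state_spec : Claim_equal_get_full_state := by
  intro c xs _hdom hpre
  unfold Pre_get_full_state at hpre
  obtain ⟨hne, hrows, hcyc⟩ := hpre
  show get_full_state c xs = get_full_state_alt c xs
  by_cases hc : 0 ≤ c
  · lift c to Nat using hc with k
    exact pos_case k xs hne hrows
  · rcases hcyc with h | h0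
    · omega
    · exact neg_case c xs (by omega) h0
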